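-- pv_equiv track=rewrite | github.com/phewing/phewing-CV | modulor.py | modulor
-- ===== SOURCE A (Python) =====
-- def modulor(n):
--     red_sequence, blue_sequence = [0, 1], [0, 2]
--     for i in range(n//2 + 2):
--         red_sequence.append(red_sequence[-1] + red_sequence[-2])
--         blue_sequence.append(blue_sequence[-1] + blue_sequence[-2])
--     if n % 2 == 0:
--         return sorted(list(set(red_sequence[1:] + blue_sequence[1:-2])))[:-1]
--     else:
--         return sorted(list(set(red_sequence[1:] + blue_sequence[1:-1])))[:-1]
-- ===== SOURCE B (Python) =====
-- def _merge_dedup(xs, ys):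
--     # merge two sorted (non-decreasing) lists into one sorted list without duplicates
--     out = []
--     i = j = 0
--     while i < len(xs) or j < len(ys):
--         if j >= len(ys) or (i < len(xs) and xs[i] <= ys[j]):
--             v = xs[i]; i += 1
--         else:
--             v = ys[j]; j += 1
--         if not out or out[-1] != v:
--             out.append(v)
--     return out
--
--
-- def modulor(n):
--     m = n // 2 + 2
--     if m < 0:
--         m = 0
--     fibs = []  # red_sequence[1:] of A: F_1 .. F_{m+1}, already non-decreasing
--     a, b = 1, 1
--     for _ in range(m + 1):
--         fibs.append(a)
--         a, b = b, a + b
--     t = m - 1 if n % 2 == 0 else m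
--     blues = [2 * x for x in fibs[:t if t > 0 else 0]]  # the doubled sequence, also sorted
--     return _merge_dedup(fibs, blues)[:-1]
-- ===== Notes on version B (the rewrite author's own statement) =====
-- stated objective: alternative
-- what changed: B generates the Fibonacci prefix once and merges the two already-sorted sequences with a single two-pointer pass and on-the-fly deduplication, replacing A's two parallel append-indexed lists plus set() plus sorted().
import Mathlib
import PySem

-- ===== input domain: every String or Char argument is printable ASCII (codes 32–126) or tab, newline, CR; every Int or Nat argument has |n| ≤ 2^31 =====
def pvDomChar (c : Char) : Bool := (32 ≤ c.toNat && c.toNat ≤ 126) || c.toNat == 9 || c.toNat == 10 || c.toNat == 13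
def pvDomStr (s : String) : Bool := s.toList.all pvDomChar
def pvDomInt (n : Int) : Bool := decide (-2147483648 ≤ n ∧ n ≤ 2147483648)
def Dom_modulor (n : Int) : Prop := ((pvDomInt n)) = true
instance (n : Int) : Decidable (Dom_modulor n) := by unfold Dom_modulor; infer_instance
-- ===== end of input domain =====

-- B replaces A's set()+sorted() over the two appended sequences by a two-pointer merge
-- (with on-the-fly dedup) of the two already-sorted generated sequences (alternative algorithm).

-- ===== PORT A =====
def modulor (n : Int) : List Int :=
  let st := (PySem.List.pyRange 0 (PySem.Int.floordiv n 2 + 2) 1).foldl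
      (fun (p : List Int × List Int) _ =>
        (p.1 ++ [PySem.List.pyGetD p.1 (-1) 0 + PySem.List.pyGetD p.1 (-2) 0],
         p.2 ++ [PySem.List.pyGetD p.2 (-1) 0 + PySem.List.pyGetD p.2 (-2) 0]))
      ([0, 1], [0, 2])
  if PySem.Int.mod n 2 = 0 then
    PySem.List.slice (PySem.List.sorted (PySem.Set.ofList
      (PySem.List.slice st.1 (some 1) none ++ PySem.List.slice st.2 (some 1) (some (-2))))
      (fun x => x) false) none (some (-1))
  else
    PySem.List.slice (PySem.List.sorted (PySem.Set.ofList
      (PySem.List.slice st.1 (some 1) none ++ PySem.List.slice st.2 (some 1) (some (-1))))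
      (fun x => x) false) none (some (-1))

-- ===== PORT B =====
-- _merge_dedup of Source B: merge two sorted lists, skipping a value equal to the last emitted one
def mergeDedup : List Int → List Int → Option Int → List Int
  | [], [], _ => []
  | x :: xs, [], last =>
      if last = some x then mergeDedup xs [] last else x :: mergeDedup xs [] (some x)
  | [], y :: ys, last =>
      if last = some y then mergeDedup [] ys last else y :: mergeDedup [] ys (some y)
  | x :: xs, y :: ys, last =>
      if x ≤ y then
        if last = some x then mergeDedup xs (y :: ys) last
        else x :: mergeDedup xs (y :: ys) (some x)
      else
        if last = some y then mergeDedup (x :: xs) ys last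
        else y :: mergeDedup (x :: xs) ys (some y)
  termination_by xs ys _ => xs.length + ys.length

def modulor_alt (n : Int) : List Int :=
  let m0 := PySem.Int.floordiv n 2 + 2
  let m := if m0 < 0 then 0 else m0
  let st := (PySem.List.pyRange 0 (m + 1) 1).foldl
      (fun (s : List Int × Int × Int) _ => (s.1 ++ [s.2.1], s.2.2, s.2.1 + s.2.2)) ([], 1, 1)
  let t := if PySem.Int.mod n 2 = 0 then m - 1 else m
  let blues := (PySem.List.slice st.1 none (some (if 0 < t then t else 0))).map (fun x => 2 * x)
  PySem.List.slice (mergeDedup st.1 blues none) none (some (-1))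

-- ===== PRECONDITION & SPEC =====
def Spec_modulor (n : Int) (out : List Int) : Prop := out = modulor_alt n
instance (n : Int) (out : List Int) : Decidable (Spec_modulor n out) := by unfold Spec_modulor; infer_instance

-- ===== CLAIM (what is proved, stated in full; the proofs are below) =====
def Claim_equal_modulor : Prop := ∀ (n : Int), Dom_modulor n → Spec_modulor n (modulor n)

-- ===== LEMMAS AND PROOFS =====

-- the Fibonacci sequence both programs generate (red = fibR, blue = 2 * fibR)
def fibR : Nat → Int
  | 0 => 0
  | 1 => 1
  | k + 2 => fibR (k + 1) + fibR k

lemma fibR_nonneg : ∀ k, 0 ≤ fibR k := by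
  intro k
  induction k using Nat.strong_induction_on with
  | _ k ih =>
    match k with
    | 0 => simp [fibR]
    | 1 => simp [fibR]
    | k + 2 =>
      have h1 := ih (k + 1) (by omega)
      have h2 := ih k (by omega)
      simp only [fibR]; omega

lemma fibR_le_succ (k : Nat) : fibR k ≤ fibR (k + 1) := by
  match k with
  | 0 => simp [fibR]
  | k + 1 => have := fibR_nonneg k; simp only [fibR]; omega

lemma fibR_mono : Monotone fibR := monotone_nat_of_le_succ fibR_le_succ

-- a foldl that ignores the list elements is an iterate of the length
lemma foldl_ignore {σ α : Type} (f : σ → σ) (init : σ) (l : List α) :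
    l.foldl (fun s _ => f s) init = f^[l.length] init := by
  induction l generalizing init with
  | nil => rfl
  | cons a l ih => simp [List.foldl_cons, ih, Function.iterate_succ_apply]

lemma length_pyRange_zero (K : Int) : (PySem.List.pyRange 0 K 1).length = K.toNat := by
  rw [PySem.List.pyRange_one]; simp

lemma aIter (k : Nat) :
    (fun (p : List Int × List Int) =>
        (p.1 ++ [PySem.List.pyGetD p.1 (-1) 0 + PySem.List.pyGetD p.1 (-2) 0],
         p.2 ++ [PySem.List.pyGetD p.2 (-1) 0 + PySem.List.pyGetD p.2 (-2) 0]))^[k]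
      (([0, 1], [0, 2]) : List Int × List Int)
    = ((List.range (k + 2)).map fibR, (List.range (k + 2)).map (fun i => 2 * fibR i)) := by
  induction k with
  | zero => decide
  | succ k ih =>
    rw [Function.iterate_succ_apply', ih]
    have hlen : ((List.range (k + 2)).map fibR).length = k + 2 := by simp
    have hlen2 : ((List.range (k + 2)).map (fun i => 2 * fibR i)).length = k + 2 := by simp
    have h1 : PySem.List.pyGetD ((List.range (k + 2)).map fibR) (-1) 0 = fibR (k + 1) := by
      rw [PySem.List.pyGetD_neg_ofNat _ 1 0 (by omega) (by omega)]
      simp [hlen]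
    have h2 : PySem.List.pyGetD ((List.range (k + 2)).map fibR) (-2) 0 = fibR k := by
      rw [PySem.List.pyGetD_neg_ofNat _ 2 0 (by omega) (by omega)]
      simp [hlen]
    have h3 : PySem.List.pyGetD ((List.range (k + 2)).map (fun i => 2 * fibR i)) (-1) 0 = 2 * fibR (k + 1) := by
      rw [PySem.List.pyGetD_neg_ofNat _ 1 0 (by omega) (by omega)]
      simp [hlen2]
    have h4 : PySem.List.pyGetD ((List.range (k + 2)).map (fun i => 2 * fibR i)) (-2) 0 = 2 * fibR k := by
      rw [PySem.List.pyGetD_neg_ofNat _ 2 0 (by omega) (by omega)]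
      simp [hlen2]
    have hred : (List.range (k + 2)).map fibR ++ [fibR (k + 1) + fibR k]
        = (List.range (k + 3)).map fibR := by
      conv_rhs => rw [show k + 3 = (k + 2) + 1 from rfl, List.range_succ]
      rw [List.map_append]
      simp [fibR]
    have hblue : (List.range (k + 2)).map (fun i => 2 * fibR i) ++ [2 * fibR (k + 1) + 2 * fibR k]
        = (List.range (k + 3)).map (fun i => 2 * fibR i) := by
      conv_rhs => rw [show k + 3 = (k + 2) + 1 from rfl, List.range_succ]
      rw [List.map_append]
      congr 1
      simp [fibR]; ring
    simp only [h1, h2, h3, h4]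
    exact Prod.ext hred hblue

lemma bIter (k : Nat) :
    (fun (s : List Int × Int × Int) => (s.1 ++ [s.2.1], s.2.2, s.2.1 + s.2.2))^[k]
      (([], 1, 1) : List Int × Int × Int)
    = ((List.range k).map (fun i => fibR (i + 1)), fibR (k + 1), fibR (k + 2)) := by
  induction k with
  | zero => simp [fibR]
  | succ k ih =>
    rw [Function.iterate_succ_apply', ih]
    refine Prod.ext ?_ (Prod.ext ?_ ?_)
    · simp [List.range_succ]
    · rfl
    · show fibR (k + 1) + fibR (k + 2) = fibR (k + 1 + 2)
      show fibR (k + 1) + fibR (k + 2) = fibR (k + 2) + fibR (k + 1)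
      ring

-- A's whole loop, as a function of the range bound
lemma aLoop (K : Int) :
    (PySem.List.pyRange 0 K 1).foldl
      (fun (p : List Int × List Int) _ =>
        (p.1 ++ [PySem.List.pyGetD p.1 (-1) 0 + PySem.List.pyGetD p.1 (-2) 0],
         p.2 ++ [PySem.List.pyGetD p.2 (-1) 0 + PySem.List.pyGetD p.2 (-2) 0]))
      ([0, 1], [0, 2])
    = ((List.range (K.toNat + 2)).map fibR, (List.range (K.toNat + 2)).map (fun i => 2 * fibR i)) := by
  exact (foldl_ignore _ _ _).trans (by rw [length_pyRange_zero]; exact aIter _)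

-- B's whole loop, as a function of the range bound
lemma bLoop (K : Int) :
    (PySem.List.pyRange 0 K 1).foldl
      (fun (s : List Int × Int × Int) _ => (s.1 ++ [s.2.1], s.2.2, s.2.1 + s.2.2)) ([], 1, 1)
    = ((List.range K.toNat).map (fun i => fibR (i + 1)), fibR (K.toNat + 1), fibR (K.toNat + 2)) := by
  exact (foldl_ignore _ _ _).trans (by rw [length_pyRange_zero]; exact bIter _)

-- slice helpers for the mixed-bound slices A uses
lemma slice_one_negtwo (xs : List Int) (h : 2 ≤ xs.length) :
    PySem.List.slice xs (some 1) (some (-2)) = (xs.drop 1).take (xs.length - 3) := by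
  simp only [PySem.List.slice, PySem.List.clampIdx]
  norm_num
  rw [if_neg (by omega : ¬ xs.length ≤ 1), min_eq_left (by omega : 1 ≤ xs.length),
    ← List.drop_one]
  congr 1
  omega

lemma slice_one_negone (xs : List Int) (h : 1 ≤ xs.length) :
    PySem.List.slice xs (some 1) (some (-1)) = (xs.drop 1).take (xs.length - 2) := by
  simp only [PySem.List.slice, PySem.List.clampIdx]
  norm_num
  rw [if_neg (by intro he; rw [he] at h; simp at h : ¬ xs = []),
    min_eq_left (by omega : 1 ≤ xs.length), ← List.drop_one]
  congr 1
  omega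

lemma pvSkipMem (x z : Int) (Q : Prop) :
    (Q ∧ some x ≠ some z) ↔ ((z = x ∨ Q) ∧ some x ≠ some z) := by
  constructor
  · rintro ⟨h1, h2⟩; exact ⟨Or.inr h1, h2⟩
  · rintro ⟨h1, h2⟩
    refine ⟨?_, h2⟩
    rcases h1 with h1 | h1
    · exact absurd (by rw [h1]) h2
    · exact h1

lemma pvEmit (v : Int) (last : Option Int) (M : List Int) (Q : Int → Prop)
    (hQv : ∀ z, Q z → v ≤ z)
    (hlastv : ∀ w, last = some w → w ≤ v)
    (hne : ¬ last = some v)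
    (P1 : M.Pairwise (· < ·))
    (P2 : ∀ z ∈ M, v < z)
    (P3 : ∀ z, z ∈ M ↔ Q z ∧ some v ≠ some z) :
    ((v :: M).Pairwise (· < ·))
      ∧ (∀ w, last = some w → ∀ z ∈ v :: M, w < z)
      ∧ (∀ z, z ∈ v :: M ↔ (z = v ∨ Q z) ∧ last ≠ some z) := by
  have hwv : ∀ w, last = some w → w < v := by
    intro w hw
    rcases lt_or_eq_of_le (hlastv w hw) with h | h
    · exact h
    · subst h; exact absurd hw hne
  refine ⟨List.pairwise_cons.mpr ⟨P2, P1⟩, ?_, ?_⟩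
  · intro w hw z hz
    rcases List.mem_cons.mp hz with rfl | hz
    · exact hwv w hw
    · exact lt_trans (hwv w hw) (P2 z hz)
  · intro z
    rw [List.mem_cons, P3 z]
    constructor
    · rintro (rfl | ⟨hQ, hvz⟩)
      · exact ⟨Or.inl rfl, hne⟩
      · refine ⟨Or.inr hQ, fun hl => ?_⟩
        exact absurd (hQv z hQ) (not_le.mpr (hwv z hl))
    · rintro ⟨hzv | hQ, hl⟩
      · exact Or.inl hzv
      · by_cases hz : z = v
        · exact Or.inl hz
        · exact Or.inr ⟨hQ, fun h => hz (Option.some.inj h).symm⟩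

set_option maxHeartbeats 1000000 in
lemma mergeDedup_spec : ∀ (xs ys : List Int) (last : Option Int),
    xs.Pairwise (· ≤ ·) → ys.Pairwise (· ≤ ·) →
    (∀ w, last = some w → (∀ z ∈ xs, w ≤ z) ∧ (∀ z ∈ ys, w ≤ z)) →
    (mergeDedup xs ys last).Pairwise (· < ·)
      ∧ (∀ w, last = some w → ∀ z ∈ mergeDedup xs ys last, w < z)
      ∧ (∀ z, z ∈ mergeDedup xs ys last ↔ (z ∈ xs ∨ z ∈ ys) ∧ last ≠ some z) := by
  intro xs ys last
  fun_induction mergeDedup xs ys last with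
  | case1 => intro _ _ _; refine ⟨by simp, by simp, by simp⟩
  | case2 x xs ih =>
    intro hxs hys hlast
    have hp := List.pairwise_cons.mp hxs
    obtain ⟨P1, P2, P3⟩ := ih hp.2 hys
      (fun w hw => ⟨fun z hz => (hlast w hw).1 z (List.mem_cons_of_mem x hz), (hlast w hw).2⟩)
    refine ⟨P1, P2, fun z => ?_⟩
    have h2 := (P3 z).trans (pvSkipMem x z _)
    simp only [List.mem_cons] at h2 ⊢
    tauto
  | case3 x xs last h ih =>
    intro hxs hys hlast
    have hp := List.pairwise_cons.mp hxs
    obtain ⟨P1, P2, P3⟩ := ih hp.2 hys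
      (fun w hw => by injection hw with hw'; subst hw'; exact ⟨hp.1, by simp⟩)
    have E := pvEmit x last (mergeDedup xs [] (some x)) (fun z => z ∈ xs ∨ z ∈ ([] : List Int))
      (fun z hz => hz.elim (fun hz => hp.1 z hz) (fun hz => by simp at hz))
      (fun w hw => (hlast w hw).1 x (List.mem_cons_self))
      h P1 (fun z hz => P2 x rfl z hz) P3
    refine ⟨E.1, E.2.1, fun z => ?_⟩
    have h2 := E.2.2 z
    simp only [List.mem_cons] at h2 ⊢
    tauto
  | case4 y ys ih =>
    intro hxs hys hlast
    have hp := List.pairwise_cons.mp hys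
    obtain ⟨P1, P2, P3⟩ := ih hxs hp.2
      (fun w hw => ⟨(hlast w hw).1, fun z hz => (hlast w hw).2 z (List.mem_cons_of_mem y hz)⟩)
    refine ⟨P1, P2, fun z => ?_⟩
    have h2 := (P3 z).trans (pvSkipMem y z _)
    simp only [List.mem_cons] at h2 ⊢
    tauto
  | case5 y ys last h ih =>
    intro hxs hys hlast
    have hp := List.pairwise_cons.mp hys
    obtain ⟨P1, P2, P3⟩ := ih hxs hp.2
      (fun w hw => by injection hw with hw'; subst hw'; exact ⟨by simp, hp.1⟩)
    have E := pvEmit y last (mergeDedup [] ys (some y)) (fun z => z ∈ ([] : List Int) ∨ z ∈ ys)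
      (fun z hz => hz.elim (fun hz => by simp at hz) (fun hz => hp.1 z hz))
      (fun w hw => (hlast w hw).2 y (List.mem_cons_self))
      h P1 (fun z hz => P2 y rfl z hz) P3
    refine ⟨E.1, E.2.1, fun z => ?_⟩
    have h2 := E.2.2 z
    simp only [List.mem_cons] at h2 ⊢
    tauto
  | case6 x xs y ys hxy ih =>
    intro hxs hys hlast
    have hp := List.pairwise_cons.mp hxs
    obtain ⟨P1, P2, P3⟩ := ih hp.2 hys
      (fun w hw => ⟨fun z hz => (hlast w hw).1 z (List.mem_cons_of_mem x hz), (hlast w hw).2⟩)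
    refine ⟨P1, P2, fun z => ?_⟩
    have h2 := (P3 z).trans (pvSkipMem x z _)
    simp only [List.mem_cons] at h2 ⊢
    tauto
  | case7 x xs y ys last hxy h ih =>
    intro hxs hys hlast
    have hp := List.pairwise_cons.mp hxs
    have hq := List.pairwise_cons.mp hys
    have hbnd : ∀ z ∈ y :: ys, x ≤ z := by
      intro z hz
      rcases List.mem_cons.mp hz with rfl | hz
      · exact hxy
      · exact le_trans hxy (hq.1 z hz)
    obtain ⟨P1, P2, P3⟩ := ih hp.2 hys
      (fun w hw => by injection hw with hw'; subst hw'; exact ⟨hp.1, hbnd⟩)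
    have E := pvEmit x last (mergeDedup xs (y :: ys) (some x))
      (fun z => z ∈ xs ∨ z ∈ y :: ys)
      (fun z hz => hz.elim (fun hz => hp.1 z hz) (fun hz => hbnd z hz))
      (fun w hw => (hlast w hw).1 x (List.mem_cons_self))
      h P1 (fun z hz => P2 x rfl z hz) P3
    refine ⟨E.1, E.2.1, fun z => ?_⟩
    have h2 := E.2.2 z
    simp only [List.mem_cons] at h2 ⊢
    tauto
  | case8 x xs y ys hxy ih =>
    intro hxs hys hlast
    have hq := List.pairwise_cons.mp hys
    obtain ⟨P1, P2, P3⟩ := ih hxs hq.2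
      (fun w hw => ⟨(hlast w hw).1, fun z hz => (hlast w hw).2 z (List.mem_cons_of_mem y hz)⟩)
    refine ⟨P1, P2, fun z => ?_⟩
    have h2 := (P3 z).trans (pvSkipMem y z _)
    simp only [List.mem_cons] at h2 ⊢
    tauto
  | case9 x xs y ys last hxy h ih =>
    intro hxs hys hlast
    have hp := List.pairwise_cons.mp hxs
    have hq := List.pairwise_cons.mp hys
    have hbnd : ∀ z ∈ x :: xs, y ≤ z := by
      intro z hz
      rcases List.mem_cons.mp hz with rfl | hz
      · exact le_of_lt (not_le.mp hxy)
      · exact le_trans (le_of_lt (not_le.mp hxy)) (hp.1 z hz)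
    obtain ⟨P1, P2, P3⟩ := ih hxs hq.2
      (fun w hw => by injection hw with hw'; subst hw'; exact ⟨hbnd, hq.1⟩)
    have E := pvEmit y last (mergeDedup (x :: xs) ys (some y))
      (fun z => z ∈ x :: xs ∨ z ∈ ys)
      (fun z hz => hz.elim (fun hz => hbnd z hz) (fun hz => hq.1 z hz))
      (fun w hw => (hlast w hw).2 y (List.mem_cons_self))
      h P1 (fun z hz => P2 y rfl z hz) P3
    refine ⟨E.1, E.2.1, fun z => ?_⟩
    have h2 := E.2.2 z
    simp only [List.mem_cons] at h2 ⊢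
    tauto

-- the merged list equals A's sorted set, by strict-sorted extensionality
lemma merge_eq_sorted_ofList (xs ys : List Int)
    (hxs : xs.Pairwise (· ≤ ·)) (hys : ys.Pairwise (· ≤ ·)) :
    PySem.List.sorted (PySem.Set.ofList (xs ++ ys)) (fun x => x) false
      = mergeDedup xs ys none := by
  obtain ⟨P1, _, P3⟩ := mergeDedup_spec xs ys none hxs hys (by simp)
  have hmem : ∀ z, z ∈ mergeDedup xs ys none ↔ z ∈ PySem.Set.ofList (xs ++ ys) := by
    intro z
    rw [P3 z, PySem.Set.mem_ofList, List.mem_append]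
    simp
  have hnodupM : (mergeDedup xs ys none).Nodup := P1.imp (fun h => ne_of_lt h)
  have hperm : (mergeDedup xs ys none).Perm (PySem.Set.ofList (xs ++ ys)) :=
    (List.perm_ext_iff_of_nodup hnodupM (PySem.Set.nodup_ofList _)).mpr hmem
  exact PySem.List.sorted_eq_of_perm_of_pairwise_lt _ _ (fun x => x) hperm P1

-- fibs/blues are non-decreasing
lemma pairwise_fibs (t : Nat) :
    ((List.range t).map (fun i => fibR (i + 1))).Pairwise (· ≤ ·) := by
  refine List.pairwise_map.mpr (List.pairwise_lt_range.imp ?_)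
  intro a b h
  exact fibR_mono (by omega)

lemma pairwise_blues (t : Nat) :
    (((List.range t).map (fun i => fibR (i + 1))).map (fun x => 2 * x)).Pairwise (· ≤ ·) := by
  refine List.pairwise_map.mpr ((pairwise_fibs t).imp ?_)
  intro a b h
  omega

-- the red slice red[1:]
lemma red_slice (k : Nat) :
    PySem.List.slice ((List.range (k + 2)).map fibR) (some 1) none
      = (List.range (k + 1)).map (fun i => fibR (i + 1)) := by
  rw [PySem.List.slice_from_one, List.range_succ_eq_map (n := k + 1)]
  simp [List.map_map, Function.comp_def]

-- the blue slices blue[1:-2] and blue[1:-1]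
lemma blue_slice_two (k : Nat) :
    PySem.List.slice ((List.range (k + 2)).map (fun i => 2 * fibR i)) (some 1) (some (-2))
      = ((List.range (k - 1)).map (fun i => fibR (i + 1))).map (fun x => 2 * x) := by
  rw [slice_one_negtwo _ (by simp)]
  rw [List.range_succ_eq_map (n := k + 1)]
  simp only [List.map_cons, List.drop_succ_cons, List.drop_zero, List.length_cons,
    List.length_map, List.length_range]
  rw [show k + 1 + 1 - 3 = k - 1 by omega, ← List.map_take, ← List.map_take, List.take_range,
    min_eq_left (by omega)]
  simp [List.map_map, Function.comp_def]

lemma blue_slice_one (k : Nat) :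
    PySem.List.slice ((List.range (k + 2)).map (fun i => 2 * fibR i)) (some 1) (some (-1))
      = ((List.range k).map (fun i => fibR (i + 1))).map (fun x => 2 * x) := by
  rw [slice_one_negone _ (by simp)]
  rw [List.range_succ_eq_map (n := k + 1)]
  simp only [List.map_cons, List.drop_succ_cons, List.drop_zero, List.length_cons,
    List.length_map, List.length_range]
  rw [show k + 1 + 1 - 2 = k by omega, ← List.map_take, ← List.map_take, List.take_range,
    min_eq_left (by omega)]
  simp [List.map_map, Function.comp_def]

-- B's take of the fibs prefix
lemma fibs_take (k t : Nat) (h : t ≤ k + 1) :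
    PySem.List.slice ((List.range (k + 1)).map (fun i => fibR (i + 1))) none (some (t : Int))
      = (List.range t).map (fun i => fibR (i + 1)) := by
  rw [PySem.List.slice_to _ (by omega), Int.toNat_natCast, ← List.map_take, List.take_range,
    min_eq_left h]

-- ===== VERDICT (by name: the statement is the Claim_ definition above) =====
theorem modulor_spec : Claim_equal_modulor := by
  unfold Claim_equal_modulor Spec_modulor
  intro n _
  have hk' : ((if PySem.Int.floordiv n 2 + 2 < 0 then 0 else PySem.Int.floordiv n 2 + 2) + 1).toNat
      = (PySem.Int.floordiv n 2 + 2).toNat + 1 := by split_ifs <;> omega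
  simp only [modulor, modulor_alt, aLoop, bLoop, hk']
  set k : Nat := (PySem.Int.floordiv n 2 + 2).toNat with hk
  have hmk : (if PySem.Int.floordiv n 2 + 2 < 0 then 0 else PySem.Int.floordiv n 2 + 2)
      = (k : Int) := by rw [hk]; split_ifs <;> omega
  rw [hmk]
  by_cases hpar : PySem.Int.mod n 2 = 0
  · simp only [hpar, if_true]
    have ht : (if (0 : Int) < (k : Int) - 1 then (k : Int) - 1 else 0) = ((k - 1 : Nat) : Int) := by
      split_ifs <;> omega
    rw [ht, red_slice, blue_slice_two, fibs_take k (k - 1) (by omega),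
      merge_eq_sorted_ofList _ _ (pairwise_fibs (k + 1)) (pairwise_blues (k - 1))]
  · simp only [hpar, if_false]
    have ht : (if (0 : Int) < (k : Int) then (k : Int) else 0) = ((k : Nat) : Int) := by
      split_ifs <;> omega
    rw [ht, red_slice, blue_slice_one, fibs_take k k (by omega),
      merge_eq_sorted_ofList _ _ (pairwise_fibs (k + 1)) (pairwise_blues k)]
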